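-- pv_equiv track=rewrite | github.com/ktylzanowski/university-tasks | graphs/matching_graph.py | if_association
-- ===== SOURCE A (Python) =====
-- def if_association(edges):
--     unique = set()
--
--     for edge in edges:
--         for vertex in edge:
--             if vertex in unique:
--                 return "Nie jest to skojarzenie"
--             unique.add(vertex)
--
--     return "Jest to skojarzenie"
-- ===== SOURCE B (Python) =====
-- def if_association(edges):
--     all_v = sorted(v for edge in edges for v in edge)
--     for a, b in zip(all_v, all_v[1:]):
--         if a == b:
--             return "Nie jest to skojarzenie"
--     return "Jest to skojarzenie"
-- ===== Notes on version B (the rewrite author's own statement) =====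
-- stated objective: alternative
-- what changed: B uses no set at all: it sorts the flattened vertex list and scans adjacent pairs for an equal neighbour (sort-then-scan duplicate detection), instead of A's incremental hash-set membership test with early return from the nested loops.
import Mathlib
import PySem

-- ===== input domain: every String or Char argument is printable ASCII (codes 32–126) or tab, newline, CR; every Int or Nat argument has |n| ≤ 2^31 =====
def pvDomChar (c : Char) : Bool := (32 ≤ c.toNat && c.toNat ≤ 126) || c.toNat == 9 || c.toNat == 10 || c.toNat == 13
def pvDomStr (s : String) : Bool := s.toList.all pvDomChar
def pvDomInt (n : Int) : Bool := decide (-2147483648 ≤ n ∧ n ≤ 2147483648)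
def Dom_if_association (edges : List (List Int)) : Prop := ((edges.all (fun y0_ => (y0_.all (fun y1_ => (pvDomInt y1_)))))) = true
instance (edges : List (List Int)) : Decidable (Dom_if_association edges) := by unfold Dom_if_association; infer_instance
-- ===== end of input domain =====

-- B detects a duplicate vertex by sorting the flattened vertex list and scanning adjacent
-- pairs, instead of A's incremental set-membership test; same result, no speed claim.

-- ===== PORT A =====
-- inner 'for vertex in edge' loop: none = early return "Nie jest to skojarzenie"
def ifAssocInner (edge : List Int) (unique : PySem.Set Int) : Option (PySem.Set Int) :=
  match edge with
  | [] => some unique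
  | v :: rest =>
    if PySem.Set.contains unique v then none
    else ifAssocInner rest (PySem.Set.add unique v)

-- outer 'for edge in edges' loop
def ifAssocOuter (edges : List (List Int)) (unique : PySem.Set Int) : String :=
  match edges with
  | [] => "Jest to skojarzenie"
  | e :: es =>
    match ifAssocInner e unique with
    | none => "Nie jest to skojarzenie"
    | some u' => ifAssocOuter es u'

def if_association (edges : List (List Int)) : String :=
  ifAssocOuter edges PySem.Set.empty

-- ===== PORT B =====
-- 'for a, b in zip(all_v, all_v[1:]): if a == b: return …' as structural recursion
def ifAssocAdjScan (s : List Int) : String :=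
  match s with
  | a :: b :: t => if a == b then "Nie jest to skojarzenie" else ifAssocAdjScan (b :: t)
  | _ => "Jest to skojarzenie"

def if_association_alt (edges : List (List Int)) : String :=
  let all_v := PySem.List.sorted (edges.flatMap (fun edge => edge)) (fun x => x) false
  ifAssocAdjScan all_v

-- ===== PRECONDITION & SPEC =====
def Spec_if_association (edges : List (List Int)) (out : String) : Prop := out = if_association_alt edges
instance (edges : List (List Int)) (out : String) : Decidable (Spec_if_association edges out) := by unfold Spec_if_association; infer_instance

-- ===== CLAIM (what is proved, stated in full; the proofs are below) =====
def Claim_equal_if_association : Prop := ∀ (edges : List (List Int)), Dom_if_association edges → Spec_if_association edges (if_association edges)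

-- ===== LEMMAS AND PROOFS =====

-- A-side characterisation: A answers "Jest" iff the flattened vertex list has no duplicates.
theorem inner_spec (edge : List Int) (u : PySem.Set Int) (hu : u.Nodup) :
    ifAssocInner edge u = if (u ++ edge).Nodup then some (u ++ edge) else none := by
  induction edge generalizing u with
  | nil => simp [ifAssocInner, hu]
  | cons v rest ih =>
    rw [ifAssocInner]
    by_cases hv : v ∈ u
    · have hc : PySem.Set.contains u v = true := (PySem.Set.contains_iff u v).mpr hv
      have hnd : ¬ (u ++ v :: rest).Nodup := by
        intro hn
        exact (List.disjoint_of_nodup_append hn) hv (by simp)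
      rw [hc]
      simp [hnd]
    · have hcv : PySem.Set.contains u v = false :=
        Bool.eq_false_iff.mpr (fun h => hv ((PySem.Set.contains_iff u v).mp h))
      have hadd : PySem.Set.add u v = u ++ [v] := by
        rw [PySem.Set.add, hcv]
        simp
      have hnadd : (u ++ [v]).Nodup := by
        rw [List.nodup_append]
        refine ⟨hu, List.nodup_singleton v, ?_⟩
        intro a ha b hb hab
        have hbv : b = v := by simpa using hb
        exact hv (by rw [← hbv, ← hab]; exact ha)
      rw [hcv]
      simp only [Bool.false_eq_true, if_false]
      rw [hadd, ih (u ++ [v]) hnadd]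
      have hassoc : (u ++ [v]) ++ rest = u ++ v :: rest := by simp
      rw [hassoc]

theorem outer_spec (edges : List (List Int)) (u : PySem.Set Int) (hu : u.Nodup) :
    ifAssocOuter edges u =
      if (u ++ edges.flatMap (fun e => e)).Nodup then "Jest to skojarzenie"
      else "Nie jest to skojarzenie" := by
  induction edges generalizing u with
  | nil => simp [ifAssocOuter, hu]
  | cons e es ih =>
    rw [ifAssocOuter, inner_spec e u hu]
    by_cases h : (u ++ e).Nodup
    · rw [if_pos h]
      show ifAssocOuter es (u ++ e) = _
      rw [ih (u ++ e) h]
      have : (u ++ e) ++ es.flatMap (fun x => x) = u ++ (e :: es).flatMap (fun x => x) := by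
        simp
      rw [this]
    · rw [if_neg h]
      have : ¬ (u ++ (e :: es).flatMap (fun x => x)).Nodup := by
        intro hn
        apply h
        have hsub : (u ++ e).Sublist (u ++ (e :: es).flatMap (fun x => x)) := by
          simp only [List.flatMap_cons]
          rw [← List.append_assoc]
          exact (List.sublist_append_left _ _)
        exact hn.sublist hsub
      rw [if_neg this]

-- B-side characterisation: on a (≤)-sorted list the adjacent scan answers "Jest" iff Nodup.
theorem adjScan_spec (s : List Int) (hs : s.Pairwise (· ≤ ·)) :
    ifAssocAdjScan s = if s.Nodup then "Jest to skojarzenie" else "Nie jest to skojarzenie" := by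
  induction s with
  | nil => simp [ifAssocAdjScan]
  | cons a t ih =>
    match t, hs with
    | [], _ => simp [ifAssocAdjScan]
    | b :: t', hs =>
      rw [ifAssocAdjScan]
      have hab : a ≤ b := (List.pairwise_cons.mp hs).1 b (by simp)
      have htail : (b :: t').Pairwise (· ≤ ·) := (List.pairwise_cons.mp hs).2
      by_cases heq : a = b
      · have hnd : ¬ (a :: b :: t').Nodup := by
          intro hn
          exact (List.nodup_cons.mp hn).1 (by simp [heq])
        simp [heq, hnd]
      · have hbeq : (a == b) = false := by simp [heq]
        rw [hbeq]
        simp only [Bool.false_eq_true, if_false]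
        rw [ih htail]
        have hnotmem : a ∉ b :: t' := by
          intro hmem
          rcases List.mem_cons.mp hmem with h | h
          · exact heq h
          · have hba : b ≤ a := (List.pairwise_cons.mp htail).1 a h
            exact heq (le_antisymm hab hba)
        by_cases hn : (b :: t').Nodup
        · have : (a :: b :: t').Nodup := List.nodup_cons.mpr ⟨hnotmem, hn⟩
          simp [hn, this]
        · have : ¬ (a :: b :: t').Nodup := fun h => hn (List.nodup_cons.mp h).2
          simp [hn, this]

-- ===== VERDICT (by name: the statement is the Claim_ definition above) =====
theorem if_association_spec : Claim_equal_if_association := by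
  intro edges _
  unfold Spec_if_association if_association if_association_alt
  rw [outer_spec edges PySem.Set.empty (by simp [PySem.Set.empty])]
  have hE : (PySem.Set.empty ++ edges.flatMap (fun e => e) : List Int) = edges.flatMap (fun e => e) := by
    simp [PySem.Set.empty]
  rw [hE]
  show _ = ifAssocAdjScan (PySem.List.sorted (edges.flatMap (fun edge => edge)) (fun x => x) false)
  rw [adjScan_spec _ (by simpa using PySem.List.sorted_pairwise (xs := edges.flatMap (fun edge => edge)) (key := fun x => x))]
  have hperm := PySem.List.sorted_perm (xs := edges.flatMap (fun edge => edge)) (key := fun x => x) (rev := false)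
  by_cases h : (edges.flatMap (fun e => e)).Nodup
  · have h2 := hperm.nodup_iff.mpr h
    rw [if_pos h, if_pos h2]
  · have h2 : ¬ (PySem.List.sorted (edges.flatMap (fun edge => edge)) (fun x => x) false).Nodup :=
      fun hc => h (hperm.nodup_iff.mp hc)
    rw [if_neg h, if_neg h2]
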